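-- pv_equiv track=rewrite | github.com/IFIR649/pixelart-forge-IA | pixelforge_ops.py | op_outline
-- ===== SOURCE A (Python) =====
-- def clone_rows(rows: list[list[str | None]]) -> list[list[str | None]]:
--     return [row[:] for row in rows]
--
-- def in_bounds(rows: list[list[str | None]], x: int, y: int) -> bool:
--     return 0 <= y < len(rows) and 0 <= x < len(rows[y])
--
-- def op_outline(rows: list[list[str | None]], color: str = "#000000") -> list[list[str | None]]:
--     out = clone_rows(rows)
--     for y, row in enumerate(rows):
--         for x, value in enumerate(row):
--             if value is None:
--                 continue
--             for dx, dy in [(-1, 0), (1, 0), (0, -1), (0, 1)]: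
--                 nx, ny = x + dx, y + dy
--                 if in_bounds(rows, nx, ny) and rows[ny][nx] is None:
--                     out[ny][nx] = color
--     return out
-- ===== SOURCE B (Python) =====
-- def op_outline(rows: list[list[str | None]], color: str = "#000000") -> list[list[str | None]]:
--     # Gather formulation: each empty cell looks at its four neighbors in the
--     # original grid and takes the outline color if any neighbor is filled.
--     def filled_neighbor(x: int, y: int) -> bool:
--         return any(
--             0 <= ny < len(rows) and 0 <= nx < len(rows[ny]) and rows[ny][nx] is not None
--             for nx, ny in ((x - 1, y), (x + 1, y), (x, y - 1), (x, y + 1))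
--         )
--     return [
--         [color if v is None and filled_neighbor(x, y) else v for x, v in enumerate(row)]
--         for y, row in enumerate(rows)
--     ]
-- ===== Notes on version B (the rewrite author's own statement) =====
-- stated objective: alternative
-- what changed: Inverts A's scatter (each filled cell writes the color into its empty neighbors of a mutable clone) into a pure gather (each empty cell checks its four neighbors in the original grid for a filled pixel), expressed as a nested comprehension with no mutation.
import Mathlib
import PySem

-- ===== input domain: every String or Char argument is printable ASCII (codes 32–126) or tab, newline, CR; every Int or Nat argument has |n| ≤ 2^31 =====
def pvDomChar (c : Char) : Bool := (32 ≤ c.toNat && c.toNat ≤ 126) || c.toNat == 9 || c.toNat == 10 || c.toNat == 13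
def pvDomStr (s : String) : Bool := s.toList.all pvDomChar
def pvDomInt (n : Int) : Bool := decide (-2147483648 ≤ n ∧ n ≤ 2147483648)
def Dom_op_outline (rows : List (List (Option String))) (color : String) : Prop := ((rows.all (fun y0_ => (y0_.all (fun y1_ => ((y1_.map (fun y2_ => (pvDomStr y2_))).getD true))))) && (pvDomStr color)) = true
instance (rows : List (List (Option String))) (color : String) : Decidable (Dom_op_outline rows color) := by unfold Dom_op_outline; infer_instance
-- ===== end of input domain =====

-- B inverts A's scatter loop (filled cells paint their empty neighbors in a mutable
-- clone) into a pure gather (each empty cell checks its neighbors in the original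
-- grid); same result, no mutation — objective: alternative decomposition.

-- ===== PORT A =====
-- clone_rows: row[:] copies each row; in a pure setting the copy is the row itself.
def pvCloneRows (rows : List (List (Option String))) : List (List (Option String)) :=
  rows.map (fun row => row)

-- in_bounds(rows, x, y) = 0 <= y < len(rows) and 0 <= x < len(rows[y])
-- (rows[y] is only reached when 0 <= y < len(rows), so pyGetD is exact there)
def pvInBounds (rows : List (List (Option String))) (x y : Int) : Bool :=
  decide (0 ≤ y ∧ y < (rows.length : Int)) &&
    decide (0 ≤ x ∧ x < ((PySem.List.pyGetD rows y []).length : Int))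

-- out[ny][nx] = color: executed only under the in_bounds guard, so 0 ≤ ny, nx
def pvSetCell (g : List (List (Option String))) (y x : Int) (c : String) :
    List (List (Option String)) :=
  g.set y.toNat ((PySem.List.pyGetD g y []).set x.toNat (some c))

def op_outline (rows : List (List (Option String))) (color : String) :
    List (List (Option String)) :=
  (PySem.List.enumerate rows 0).foldl (fun out yr =>
    (PySem.List.enumerate yr.2 0).foldl (fun out xv =>
      match xv.2 with
      | none => out
      | some _ =>
        ([((-1 : Int), (0 : Int)), (1, 0), (0, -1), (0, 1)]).foldl (fun out d =>
          let nx := xv.1 + d.1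
          let ny := yr.1 + d.2
          if pvInBounds rows nx ny ∧
              PySem.List.pyGetD (PySem.List.pyGetD rows ny []) nx none = none then
            pvSetCell out ny nx color
          else out) out) out)
    (pvCloneRows rows)

-- ===== PORT B =====
-- any(... for nx, ny in ((x-1,y),(x+1,y),(x,y-1),(x,y+1)))
def pvFilledNeighbor (rows : List (List (Option String))) (x y : Int) : Bool :=
  [(x - 1, y), (x + 1, y), (x, y - 1), (x, y + 1)].any (fun p =>
    decide (0 ≤ p.2 ∧ p.2 < (rows.length : Int)) &&
    (decide (0 ≤ p.1 ∧ p.1 < ((PySem.List.pyGetD rows p.2 []).length : Int)) &&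
      (PySem.List.pyGetD (PySem.List.pyGetD rows p.2 []) p.1 none).isSome))

def op_outline_alt (rows : List (List (Option String))) (color : String) :
    List (List (Option String)) :=
  (PySem.List.enumerate rows 0).map (fun yr =>
    (PySem.List.enumerate yr.2 0).map (fun xv =>
      if xv.2 = none ∧ pvFilledNeighbor rows xv.1 yr.1 then some color else xv.2))

-- ===== PRECONDITION & SPEC =====
def Spec_op_outline (rows : List (List (Option String))) (color : String) (out : List (List (Option String))) : Prop := out = op_outline_alt rows color
instance (rows : List (List (Option String))) (color : String) (out : List (List (Option String))) : Decidable (Spec_op_outline rows color out) := by unfold Spec_op_outline; infer_instance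

-- ===== CLAIM (what is proved, stated in full; the proofs are below) =====
def Claim_equal_op_outline : Prop := ∀ (rows : List (List (Option String))) (color : String), Dom_op_outline rows color → Spec_op_outline rows color (op_outline rows color)

-- ===== LEMMAS AND PROOFS =====

-- total cell read with Nat indices
def pvCellN (g : List (List (Option String))) (Y X : Nat) : Option String :=
  (g.getD Y []).getD X none

-- the list of (ny, nx) targets A's scatter loop writes to, in order
def pvWrites (rows : List (List (Option String))) : List (Int × Int) :=
  (PySem.List.enumerate rows 0).flatMap (fun yr =>
    (PySem.List.enumerate yr.2 0).flatMap (fun xv =>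
      match xv.2 with
      | none => []
      | some _ =>
        ([((-1 : Int), (0 : Int)), (1, 0), (0, -1), (0, 1)]).filterMap (fun d =>
          if pvInBounds rows (xv.1 + d.1) (yr.1 + d.2) ∧
              PySem.List.pyGetD (PySem.List.pyGetD rows (yr.1 + d.2) []) (xv.1 + d.1) none = none then
            some (yr.1 + d.2, xv.1 + d.1)
          else none)))

def pvFoldW (L : List (Int × Int)) (g : List (List (Option String))) (c : String) :
    List (List (Option String)) :=
  L.foldl (fun out p => pvSetCell out p.1 p.2 c) g

theorem foldl_if_filterMap {α β γ : Type} (L : List α) (c : α → Prop) [DecidablePred c]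
    (g : α → γ) (f : β → γ → β) (init : β) :
    L.foldl (fun s a => if c a then f s (g a) else s) init =
      (L.filterMap (fun a => if c a then some (g a) else none)).foldl f init := by
  induction L generalizing init with
  | nil => rfl
  | cons a L ih => by_cases h : c a <;> simp [h, ih]

theorem setCell_len (g : List (List (Option String))) (y x : Int) (c : String) :
    (pvSetCell g y x c).length = g.length := by
  simp [pvSetCell]

theorem setCell_rowlen (g : List (List (Option String))) (y x : Int) (c : String)
    (hy : 0 ≤ y) (Y : Nat) :
    ((pvSetCell g y x c).getD Y []).length = (g.getD Y []).length := by
  unfold pvSetCell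
  rw [PySem.List.pyGetD_of_nonneg _ _ hy]
  rw [List.getD_eq_getElem?_getD, List.getElem?_set]
  split_ifs with h1 h2
  · subst h1
    simp [List.getD_eq_getElem?_getD, List.getElem?_eq_getElem h2]
  · subst h1
    have hn : g[y.toNat]? = none := List.getElem?_eq_none (by omega)
    simp [List.getD_eq_getElem?_getD, hn]
  · rw [List.getD_eq_getElem?_getD]

theorem setCell_cell (g : List (List (Option String))) (y x : Int) (c : String)
    (hy : 0 ≤ y) (hx : 0 ≤ x) (Y X : Nat) :
    pvCellN (pvSetCell g y x c) Y X =
      if y = (Y : Int) ∧ x = (X : Int) ∧ Y < g.length ∧ X < (g.getD Y []).length then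
        some c
      else pvCellN g Y X := by
  unfold pvCellN pvSetCell
  rw [PySem.List.pyGetD_of_nonneg _ _ hy]
  rw [List.getD_eq_getElem?_getD (l := List.set _ _ _), List.getElem?_set]
  by_cases hYe : y.toNat = Y
  · rw [if_pos hYe]
    subst hYe
    by_cases hlen : y.toNat < g.length
    · rw [if_pos hlen]
      simp only [Option.getD_some]
      rw [List.getD_eq_getElem?_getD (l := List.set _ _ _), List.getElem?_set]
      by_cases hX : x.toNat = X
      · subst hX
        rw [if_pos rfl]
        by_cases hxl : x.toNat < (g.getD y.toNat []).length
        · rw [if_pos hxl, if_pos ⟨by omega, by omega, hlen, hxl⟩]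
          rfl
        · rw [if_neg hxl, if_neg (fun h => hxl h.2.2.2)]
          have hn : (g.getD y.toNat [])[x.toNat]? = none := List.getElem?_eq_none (by omega)
          rw [List.getD_eq_getElem?_getD (l := g.getD _ _), hn]
      · rw [if_neg hX, if_neg (by intro h; exact hX (by omega))]
        rw [List.getD_eq_getElem?_getD (l := g.getD _ _)]
    · rw [if_neg hlen, if_neg (fun h => hlen h.2.2.1)]
      have hn : g[y.toNat]? = none := List.getElem?_eq_none (by omega)
      simp [List.getD_eq_getElem?_getD, hn]
  · rw [if_neg hYe, if_neg (by intro h; omega)]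
    rw [List.getD_eq_getElem?_getD (l := g)]

theorem foldW_len (L : List (Int × Int)) (g : List (List (Option String))) (c : String) :
    (pvFoldW L g c).length = g.length := by
  induction L generalizing g with
  | nil => rfl
  | cons p L ih => simp [pvFoldW] at ih ⊢; rw [ih, setCell_len]

theorem foldW_rowlen (L : List (Int × Int)) (g : List (List (Option String))) (c : String)
    (hL : ∀ p ∈ L, 0 ≤ p.1) (Y : Nat) :
    ((pvFoldW L g c).getD Y []).length = (g.getD Y []).length := by
  induction L generalizing g with
  | nil => rfl
  | cons p L ih =>
    simp only [pvFoldW, List.foldl_cons] at ih ⊢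
    rw [ih _ (fun q hq => hL q (by simp [hq])), setCell_rowlen _ _ _ _ (hL p (by simp))]

theorem foldW_cell (L : List (Int × Int)) (g : List (List (Option String))) (c : String)
    (hL : ∀ p ∈ L, 0 ≤ p.1 ∧ 0 ≤ p.2) (Y X : Nat) :
    pvCellN (pvFoldW L g c) Y X =
      if (∃ p ∈ L, p.1 = (Y : Int) ∧ p.2 = (X : Int)) ∧ Y < g.length ∧ X < (g.getD Y []).length then
        some c
      else pvCellN g Y X := by
  induction L generalizing g with
  | nil => simp [pvFoldW]
  | cons p L ih =>
    obtain ⟨hp1, hp2⟩ := hL p (by simp)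
    have hL' : ∀ q ∈ L, 0 ≤ q.1 ∧ 0 ≤ q.2 := fun q hq => hL q (by simp [hq])
    simp only [pvFoldW, List.foldl_cons] at ih ⊢
    rw [ih _ hL', setCell_len, setCell_rowlen _ _ _ _ hp1,
      setCell_cell _ _ _ _ hp1 hp2]
    by_cases hb : Y < g.length ∧ X < (g.getD Y []).length
    · by_cases hex : ∃ q ∈ L, q.1 = (Y : Int) ∧ q.2 = (X : Int)
      · obtain ⟨q, hq, hqe⟩ := hex
        rw [if_pos ⟨⟨q, hq, hqe⟩, hb⟩, if_pos ⟨⟨q, by simp [hq], hqe⟩, hb⟩]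
      · rw [if_neg (fun h => hex h.1)]
        by_cases hpm : p.1 = (Y : Int) ∧ p.2 = (X : Int)
        · rw [if_pos ⟨hpm.1, hpm.2, hb.1, hb.2⟩, if_pos ⟨⟨p, by simp, hpm⟩, hb⟩]
        · rw [if_neg (fun h => hpm ⟨h.1, h.2.1⟩)]
          rw [if_neg (by
            rintro ⟨⟨q, hq, hqe⟩, -⟩
            rcases List.mem_cons.mp hq with rfl | hq'
            · exact hpm hqe
            · exact hex ⟨q, hq', hqe⟩)]
    · rw [if_neg (fun h => hb h.2), if_neg (fun h => hb h.2.2),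
        if_neg (fun h => hb h.2)]

theorem writes_nonneg (rows : List (List (Option String))) :
    ∀ p ∈ pvWrites rows, 0 ≤ p.1 ∧ 0 ≤ p.2 := by
  intro p hp
  simp only [pvWrites, List.mem_flatMap] at hp
  obtain ⟨yr, hyr, xv, hxv, hp⟩ := hp
  cases hv : xv.2 with
  | none => rw [hv] at hp; simp at hp
  | some s =>
    rw [hv] at hp
    simp only [List.mem_filterMap] at hp
    obtain ⟨d, hd, hpd⟩ := hp
    split_ifs at hpd with hg
    · obtain ⟨hb, -⟩ := hg
      simp only [pvInBounds, Bool.and_eq_true, decide_eq_true_eq] at hb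
      cases hpd
      exact ⟨hb.1.1, hb.2.1⟩

theorem foldl_foldl_flatMap {α γ β : Type} (L : List α) (h : α → List γ)
    (f : β → γ → β) (init : β) :
    L.foldl (fun s a => (h a).foldl f s) init = (L.flatMap h).foldl f init := by
  induction L generalizing init with
  | nil => rfl
  | cons a L ih => simp only [List.flatMap_cons, List.foldl_append, List.foldl_cons, ih]

theorem A_eq_foldW (rows : List (List (Option String))) (color : String) :
    op_outline rows color = pvFoldW (pvWrites rows) rows color := by
  have hclone : pvCloneRows rows = rows := by simp [pvCloneRows]
  unfold op_outline pvFoldW pvWrites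
  rw [hclone, ← foldl_foldl_flatMap]
  congr 1
  funext out yr
  rw [← foldl_foldl_flatMap]
  congr 1
  funext out xv
  obtain ⟨xi, xval⟩ := xv
  cases xval with
  | none => rfl
  | some s =>
    exact foldl_if_filterMap
      ([((-1 : Int), (0 : Int)), (1, 0), (0, -1), (0, 1)])
      (fun d => pvInBounds rows (xi + d.1) (yr.1 + d.2) = true ∧
        PySem.List.pyGetD (PySem.List.pyGetD rows (yr.1 + d.2) []) (xi + d.1) none = none)
      (fun d => (yr.1 + d.2, xi + d.1))
      (fun o p => pvSetCell o p.1 p.2 color) out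

theorem mem_writes (rows : List (List (Option String))) (Y X : Nat)
    (hY : Y < rows.length) (hX : X < (rows.getD Y []).length) :
    (∃ p ∈ pvWrites rows, p.1 = (Y : Int) ∧ p.2 = (X : Int)) ↔
      ((rows.getD Y []).getD X none = none ∧ pvFilledNeighbor rows (X : Int) (Y : Int) = true) := by
  have hrowY : rows.getD Y [] = rows[Y] := List.getD_eq_getElem _ _ hY
  constructor
  · rintro ⟨p, hp, hpY, hpX⟩
    simp only [pvWrites, List.mem_flatMap] at hp
    obtain ⟨yr, hyr, xv, hxv, hp⟩ := hp
    rw [PySem.List.mem_enumerate_iff] at hyr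
    obtain ⟨k, hk, rfl⟩ := hyr
    rw [PySem.List.mem_enumerate_iff] at hxv
    obtain ⟨j, hj, rfl⟩ := hxv
    dsimp only at hp hj
    cases hv : rows[k][j] with
    | none => rw [hv] at hp; simp at hp
    | some s =>
      rw [hv] at hp
      simp only [List.mem_filterMap] at hp
      obtain ⟨d, hd, hif⟩ := hp
      split_ifs at hif with hg
      · obtain ⟨hb, hcell⟩ := hg
        injection hif with hif
        subst hif
        dsimp only at hpY hpX
        simp only [pvInBounds, Bool.and_eq_true, decide_eq_true_eq] at hb
        have hpg : PySem.List.pyGetD rows ((k : Nat) : Int) [] = rows[k] := by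
          rw [PySem.List.pyGetD_of_nonneg _ _ (by omega)]
          simp [List.getElem?_eq_getElem hk, List.getD_eq_getElem?_getD]
        constructor
        · rw [show ((0 : Int) + ↑k + d.2) = (Y : Int) from hpY,
            show ((0 : Int) + ↑j + d.1) = (X : Int) from hpX] at hcell
          rw [PySem.List.pyGetD_of_nonneg _ _ (by omega),
            PySem.List.pyGetD_of_nonneg _ _ (by omega)] at hcell
          simpa using hcell
        · rw [pvFilledNeighbor, List.any_eq_true]
          refine ⟨((j : Int), (k : Int)), ?_, ?_⟩
          · simp only [List.mem_cons, List.not_mem_nil, or_false] at hd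
            simp only [List.mem_cons, List.not_mem_nil, or_false, Prod.mk.injEq]
            rcases hd with rfl | rfl | rfl | rfl <;> dsimp only at hpY hpX <;> omega
          · simp only [Bool.and_eq_true, decide_eq_true_eq]
            refine ⟨⟨by omega, by omega⟩, ⟨by omega, ?_⟩, ?_⟩
            · rw [hpg]; exact_mod_cast hj
            · rw [hpg, PySem.List.pyGetD_of_nonneg _ _ (by omega)]
              simp only [Int.toNat_natCast]
              rw [List.getD_eq_getElem _ _ hj, hv]
              rfl
  · rintro ⟨hnone, hfn⟩
    rw [hrowY] at hnone hX
    rw [pvFilledNeighbor, List.any_eq_true] at hfn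
    obtain ⟨p0, hp0mem, hp0⟩ := hfn
    simp only [Bool.and_eq_true, decide_eq_true_eq] at hp0
    obtain ⟨⟨hk0, hk1⟩, ⟨hj0, hj1⟩, hsome⟩ := hp0
    have hklen : p0.2.toNat < rows.length := by omega
    have hrk : PySem.List.pyGetD rows p0.2 [] = rows[p0.2.toNat] := by
      rw [PySem.List.pyGetD_of_nonneg _ _ hk0, List.getD_eq_getElem _ _ hklen]
    rw [hrk] at hj1 hsome
    have hjlen : p0.1.toNat < (rows[p0.2.toNat]'hklen).length := by omega
    obtain ⟨s, hs⟩ := Option.isSome_iff_exists.mp hsome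
    rw [PySem.List.pyGetD_of_nonneg _ _ hj0, List.getD_eq_getElem _ _ hjlen] at hs
    refine ⟨((Y : Int), (X : Int)), ?_, rfl, rfl⟩
    simp only [pvWrites, List.mem_flatMap]
    refine ⟨(0 + (p0.2.toNat : Int), rows[p0.2.toNat]'hklen),
      (PySem.List.mem_enumerate_iff _ _ _).mpr ⟨p0.2.toNat, hklen, rfl⟩, ?_⟩
    refine ⟨(0 + (p0.1.toNat : Int), (rows[p0.2.toNat]'hklen)[p0.1.toNat]'hjlen),
      (PySem.List.mem_enumerate_iff _ _ _).mpr ⟨p0.1.toNat, hjlen, rfl⟩, ?_⟩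
    dsimp only
    rw [hs]
    simp only [List.mem_filterMap]
    refine ⟨((X : Int) - p0.1, (Y : Int) - p0.2), ?_, ?_⟩
    · simp only [List.mem_cons, List.not_mem_nil, or_false] at hp0mem
      simp only [List.mem_cons, List.not_mem_nil, or_false, Prod.mk.injEq]
      rcases hp0mem with rfl | rfl | rfl | rfl <;> dsimp only at hk0 hk1 hj0 hj1 ⊢ <;> omega
    · have hax : (0 : Int) + ↑p0.1.toNat + ((X : Int) - p0.1) = (X : Int) := by omega
      have hay : (0 : Int) + ↑p0.2.toNat + ((Y : Int) - p0.2) = (Y : Int) := by omega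
      have hguard : pvInBounds rows ((X : Nat) : Int) ((Y : Nat) : Int) = true ∧
          PySem.List.pyGetD (PySem.List.pyGetD rows ((Y : Nat) : Int) []) ((X : Nat) : Int) none = none := by
        constructor
        · simp only [pvInBounds, Bool.and_eq_true, decide_eq_true_eq]
          refine ⟨⟨by omega, by omega⟩, by omega, ?_⟩
          rw [PySem.List.pyGetD_of_nonneg _ _ (by omega)]
          simp only [Int.toNat_natCast]
          rw [List.getD_eq_getElem _ _ hY]
          exact_mod_cast hX
        · rw [PySem.List.pyGetD_of_nonneg _ _ (by omega),
            PySem.List.pyGetD_of_nonneg _ _ (by omega)]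
          simp only [Int.toNat_natCast]
          rw [List.getD_eq_getElem _ _ hY]
          exact hnone
      rw [hax, hay, if_pos hguard]

theorem alt_len (rows : List (List (Option String))) (color : String) :
    (op_outline_alt rows color).length = rows.length := by
  simp [op_outline_alt, PySem.List.length_enumerate]

theorem alt_rowlen (rows : List (List (Option String))) (color : String) (Y : Nat) :
    ((op_outline_alt rows color).getD Y []).length = (rows.getD Y []).length := by
  by_cases hY : Y < rows.length
  · rw [List.getD_eq_getElem _ _ (by rw [alt_len]; exact hY), List.getD_eq_getElem _ _ hY]
    simp [op_outline_alt, PySem.List.length_enumerate, PySem.List.getElem_enumerate]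
  · have h1 : (op_outline_alt rows color)[Y]? = none :=
      List.getElem?_eq_none (by rw [alt_len]; omega)
    have h2 : rows[Y]? = none := List.getElem?_eq_none (by omega)
    simp [List.getD_eq_getElem?_getD, h1, h2]

theorem alt_cell (rows : List (List (Option String))) (color : String) (Y X : Nat)
    (hY : Y < rows.length) (hX : X < (rows.getD Y []).length) :
    pvCellN (op_outline_alt rows color) Y X =
      if (rows.getD Y []).getD X none = none ∧ pvFilledNeighbor rows (X : Int) (Y : Int) = true then
        some color
      else (rows.getD Y []).getD X none := by
  unfold pvCellN
  rw [List.getD_eq_getElem _ _ (show Y < (op_outline_alt rows color).length by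
        rw [alt_len]; exact hY)]
  have hb2 : X < ((op_outline_alt rows color)[Y]'(by rw [alt_len]; exact hY)).length := by
    rw [← List.getD_eq_getElem _ ([] : List (Option String))
          (show Y < (op_outline_alt rows color).length by rw [alt_len]; exact hY),
      alt_rowlen]
    exact hX
  rw [List.getD_eq_getElem _ _ hb2]
  rw [List.getD_eq_getElem _ _ hY] at hX ⊢
  rw [List.getD_eq_getElem _ _ hX]
  simp only [op_outline_alt, List.getElem_map, PySem.List.getElem_enumerate]
  simp

-- ===== VERDICT (by name: the statement is the Claim_ definition above) =====
theorem op_outline_spec : Claim_equal_op_outline := by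
  intro rows color _
  unfold Spec_op_outline
  rw [A_eq_foldW]
  have hnn := writes_nonneg rows
  have hnn1 : ∀ p ∈ pvWrites rows, 0 ≤ p.1 := fun p hp => (hnn p hp).1
  apply List.ext_getElem
  · rw [foldW_len, alt_len]
  intro Y hY1 hY2
  have hYr : Y < rows.length := by rw [foldW_len] at hY1; exact hY1
  apply List.ext_getElem
  · have h1 := foldW_rowlen (pvWrites rows) rows color hnn1 Y
    have h2 := alt_rowlen rows color Y
    rw [List.getD_eq_getElem _ _ hY1] at h1
    rw [List.getD_eq_getElem _ _ hY2] at h2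
    rw [h1, h2]
  intro X hX1 hX2
  have hXr : X < (rows.getD Y []).length := by
    have h := foldW_rowlen (pvWrites rows) rows color hnn1 Y
    rw [List.getD_eq_getElem _ _ hY1] at h
    omega
  have hl : (pvFoldW (pvWrites rows) rows color)[Y][X] =
      pvCellN (pvFoldW (pvWrites rows) rows color) Y X := by
    unfold pvCellN
    rw [List.getD_eq_getElem _ _ hY1, List.getD_eq_getElem _ _ hX1]
  have hr : (op_outline_alt rows color)[Y][X] = pvCellN (op_outline_alt rows color) Y X := by
    unfold pvCellN
    rw [List.getD_eq_getElem _ _ hY2, List.getD_eq_getElem _ _ hX2]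
  rw [hl, hr, foldW_cell _ _ _ hnn, alt_cell _ _ _ _ hYr hXr]
  by_cases hc : (rows.getD Y []).getD X none = none ∧ pvFilledNeighbor rows (X : Int) (Y : Int) = true
  · rw [if_pos ⟨(mem_writes rows Y X hYr hXr).mpr hc, hYr, hXr⟩, if_pos hc]
  · rw [if_neg (fun h => hc ((mem_writes rows Y X hYr hXr).mp h.1)), if_neg hc]
    rfl
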